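-- pv_equiv track=rewrite | github.com/ErelEdry/HW4.0 | q3.py | create_words_recursive
-- ===== SOURCE A (Python) =====
-- def find_letter_in_list(arr, letter, index):
--     """
--     Find the index of a letter in a list.
--     :param arr: list of letters
--     :param letter: letter to find
--     :param index: index of the letter
--     :return: index of the letter
--     """
--     # If the list is empty, return None
--     if len(arr) == 0:
--         return None
--     # If the first letter matches, return the index
--     if arr[0] == letter:
--         return index
--     # Increase the index by 1
--     index += 1
--     # Remove the first letter from the list
--     arr.pop(0)
--     # Call the function again with the rest of the list
--     return find_letter_in_list(arr, letter, index)
--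
-- def check_if_word_in_cards(cards, word):
--     """
--     Check if a word can be made from a list of letters.
--     :param cards: list of letters
--     :param word: word to check
--     :return: True if we can make word from the list of letters, else False
--     """
--     # If the word is empty, return True
--     if word == "":
--         return True
--     # Find the index of the first letter in the list
--     letter_index = find_letter_in_list(cards.copy(), word[0], 0)
--     # If the letter is found, remove it and check the rest of the word
--     if letter_index is not None:
--         cards.pop(letter_index)
--         return check_if_word_in_cards(cards.copy(), word[1:])
--     # If the letter is not found, return False
--     return False
--
-- def create_words_recursive(cards, words, max_value, max_value_word):
--     """
--     Find the word with the max value that can be made from the cards. (but all the recursive calls are done in this function)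
--     :param cards: list of letters
--     :param words: dictionary of words and their values
--     :param max_value: max value of the word
--     :param max_value_word: the word with the max value
--     :return: the word with the max value that can be made from the cards
--     """
--     words=words.copy()
--     # If there are no more words, return the word with the max value
--     if len(words) == 0:
--         return max_value_word
--     # Take one word and its value from the dictionary
--     word, value = words.popitem()
--     if check_if_word_in_cards(cards.copy(), word):
--         if max_value == None or max_value < value:
--             max_value_word = word
--             max_value = value
--     return create_words_recursive(cards, words, max_value, max_value_word)
-- ===== SOURCE B (Python) =====
-- def create_words_recursive(cards, words, max_value, max_value_word):
--     best_value, best_word = max_value, max_value_word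
--     for word, value in reversed(list(words.items())):
--         if all(word.count(ch) <= cards.count(ch) for ch in set(word)):
--             if best_value is None or value > best_value:
--                 best_value, best_word = value, word
--     return best_word
-- ===== Notes on version B (the rewrite author's own statement) =====
-- stated objective: simpler
-- what changed: Replaced A's three mutually-recursive functions (popitem-driven recursion over the dict plus a greedy find-index-and-remove buildability check that repeatedly copies and mutates the card list) by a single iterative pass over reversed(words.items()) with a best-value accumulator and a per-word letter-count comparison (word.count(ch) <= cards.count(ch)).
import Mathlib
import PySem

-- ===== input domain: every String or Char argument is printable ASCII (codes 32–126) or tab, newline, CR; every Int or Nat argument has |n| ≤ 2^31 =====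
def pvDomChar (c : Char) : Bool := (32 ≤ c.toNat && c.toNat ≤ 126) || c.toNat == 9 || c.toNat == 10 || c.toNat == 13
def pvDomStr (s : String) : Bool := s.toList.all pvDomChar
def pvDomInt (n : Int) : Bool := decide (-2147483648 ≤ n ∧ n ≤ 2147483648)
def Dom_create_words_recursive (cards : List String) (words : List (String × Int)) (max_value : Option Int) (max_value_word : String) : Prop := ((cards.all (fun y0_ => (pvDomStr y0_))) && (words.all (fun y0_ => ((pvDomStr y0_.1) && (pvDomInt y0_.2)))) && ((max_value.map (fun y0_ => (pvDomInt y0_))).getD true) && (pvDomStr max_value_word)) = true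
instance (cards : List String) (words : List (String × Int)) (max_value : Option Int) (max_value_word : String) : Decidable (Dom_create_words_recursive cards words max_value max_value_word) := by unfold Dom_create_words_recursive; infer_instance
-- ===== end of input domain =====

-- B replaces A's recursion (popitem recursion + greedy letter-by-letter find-and-remove) by one
-- iterative pass with a per-word letter-count test; objective: simpler. A only mutates copies of
-- its arguments, so the caller observes no side effects.

-- ===== PORT A =====
def find_letter_in_list (arr : List String) (letter : String) (index : Int) : Option Int :=
  match arr with
  | [] => none
  | a :: rest =>
    if a == letter then some index
    -- index += 1; arr.pop(0); recurse on the rest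
    else find_letter_in_list rest letter (index + 1)

def check_if_word_in_cards (cards : List String) (word : List Char) : Bool :=
  match word with
  | [] => true                                  -- word == ""
  | c :: rest =>                                -- word[0], word[1:]
    match find_letter_in_list cards (String.singleton c) 0 with
    -- cards.pop(letter_index): the found index is ≥ 0 and < len(cards), so eraseIdx is exact here
    | some i => check_if_word_in_cards (cards.eraseIdx i.toNat) rest
    | none => false

def create_words_recursive (cards : List String) (words : List (String × Int)) (max_value : Option Int) (max_value_word : String) : String :=
  match words with
  | [] => max_value_word
  | w :: ws =>
    -- word, value = words.popitem()  (pops the LAST item of the dict)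
    let wv := (w :: ws).getLast (by simp)
    let acc : Option Int × String :=
      if check_if_word_in_cards cards wv.1.toList then
        if (match max_value with | none => true | some v => v < wv.2) then (some wv.2, wv.1)
        else (max_value, max_value_word)
      else (max_value, max_value_word)
    create_words_recursive cards (w :: ws).dropLast acc.1 acc.2
termination_by words.length
decreasing_by simp

-- ===== PORT B =====
-- all(word.count(ch) <= cards.count(ch) for ch in set(word))
def pyBuildable (cards : List String) (word : String) : Bool :=
  (PySem.Set.ofList word.toList).all
    (fun ch => word.toList.count ch ≤ PySem.List.count cards (String.singleton ch))

def create_words_recursive_alt (cards : List String) (words : List (String × Int)) (max_value : Option Int) (max_value_word : String) : String :=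
  (words.reverse.foldl
    (fun acc wv =>
      if pyBuildable cards wv.1 then
        if (match acc.1 with | none => true | some bv => bv < wv.2) then (some wv.2, wv.1)
        else acc
      else acc)
    (max_value, max_value_word)).2

-- ===== PRECONDITION & SPEC =====
def Spec_create_words_recursive (cards : List String) (words : List (String × Int)) (max_value : Option Int) (max_value_word : String) (out : String) : Prop := out = create_words_recursive_alt cards words max_value max_value_word
instance (cards : List String) (words : List (String × Int)) (max_value : Option Int) (max_value_word : String) (out : String) : Decidable (Spec_create_words_recursive cards words max_value max_value_word out) := by unfold Spec_create_words_recursive; infer_instance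

-- ===== CLAIM (what is proved, stated in full; the proofs are below) =====
def Claim_equal_create_words_recursive : Prop := ∀ (cards : List String) (words : List (String × Int)) (max_value : Option Int) (max_value_word : String), Dom_create_words_recursive cards words max_value max_value_word → Spec_create_words_recursive cards words max_value max_value_word (create_words_recursive cards words max_value max_value_word)

-- ===== LEMMAS AND PROOFS =====

-- find_letter_in_list returns index + (first index of letter), if any
theorem find_letter_spec (arr : List String) (letter : String) (index : Int) :
    find_letter_in_list arr letter index
      = (List.idxOf? letter arr).map (fun k => index + (k : Int)) := by
  induction arr generalizing index with
  | nil => simp [find_letter_in_list, List.idxOf?]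
  | cons a rest ih =>
    by_cases h : (a == letter) = true
    · simp [find_letter_in_list, List.idxOf?, List.findIdx?_cons, h]
    · rw [show find_letter_in_list (a :: rest) letter index
            = find_letter_in_list rest letter (index + 1) from by
        simp [find_letter_in_list, h]]
      rw [ih]
      simp only [List.idxOf?, List.findIdx?_cons, h, if_false, Bool.false_eq_true]
      rcases List.findIdx? (fun x => x == letter) rest with _ | k
      · rfl
      · simp; omega

theorem find0_none (arr : List String) (s : String)
    (h : List.idxOf? s arr = none) : find_letter_in_list arr s 0 = none := by
  rw [find_letter_spec, h]; rfl

theorem find0_some (arr : List String) (s : String) (k : Nat)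
    (h : List.idxOf? s arr = some k) : find_letter_in_list arr s 0 = some (k : Int) := by
  rw [find_letter_spec, h]; simp

theorem singleton_inj {c d : Char} (h : String.singleton c = String.singleton d) : c = d := by
  have := congrArg String.toList h
  simpa [String.singleton] using this

-- A's greedy find-and-remove check succeeds iff every letter count of the word is covered by the cards
theorem check_iff (w : List Char) (cards : List String) :
    check_if_word_in_cards cards w = true
      ↔ ∀ c : Char, w.count c ≤ cards.count (String.singleton c) := by
  induction w generalizing cards with
  | nil => simp [check_if_word_in_cards]
  | cons c rest ih =>
    rcases hidx : List.idxOf? (String.singleton c) cards with _ | k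
    · have hmem : String.singleton c ∉ cards := List.idxOf?_eq_none_iff.mp hidx
      have hz : cards.count (String.singleton c) = 0 := List.count_eq_zero_of_not_mem hmem
      rw [check_if_word_in_cards, find0_none _ _ hidx]
      constructor
      · intro h; cases h
      · intro h
        have h1 := h c
        rw [List.count_cons_self, hz] at h1
        omega
    · have hmem : String.singleton c ∈ cards := by
        by_contra hn
        rw [List.idxOf?_eq_none_iff.mpr hn] at hidx; cases hidx
      have hcnt : 1 ≤ cards.count (String.singleton c) := List.one_le_count_iff.mpr hmem
      have herase : cards.eraseIdx k = cards.erase (String.singleton c) := by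
        rw [List.erase_eq_eraseIdx, hidx]
      rw [check_if_word_in_cards, find0_some _ _ _ hidx]
      show check_if_word_in_cards (cards.eraseIdx ((k : Int)).toNat) rest = true ↔ _
      rw [Int.toNat_natCast, herase, ih]
      constructor
      · intro h d
        by_cases hdc : d = c
        · subst hdc
          have h1 := h d
          rw [List.count_erase_self] at h1
          rw [List.count_cons_self]
          omega
        · have h1 := h d
          rw [List.count_erase_of_ne (fun he => hdc (singleton_inj he))] at h1
          rw [List.count_cons_of_ne (Ne.symm hdc)]
          exact h1
      · intro h d
        by_cases hdc : d = c
        · subst hdc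
          have h1 := h d
          rw [List.count_cons_self] at h1
          rw [List.count_erase_self]
          omega
        · have h1 := h d
          rw [List.count_cons_of_ne (Ne.symm hdc)] at h1
          rw [List.count_erase_of_ne (fun he => hdc (singleton_inj he))]
          exact h1

theorem buildable_eq_check (cards : List String) (word : String) :
    pyBuildable cards word = check_if_word_in_cards cards word.toList := by
  rcases hb : check_if_word_in_cards cards word.toList with _ | _
  · apply Bool.eq_false_iff.mpr
    intro hall
    have hc : ∀ c : Char, word.toList.count c ≤ cards.count (String.singleton c) := by
      intro c
      by_cases hcm : c ∈ word.toList
      · have hc' : c ∈ PySem.Set.ofList word.toList := (PySem.Set.mem_ofList _ _).mpr hcm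
        have := List.all_eq_true.mp hall c hc'
        simpa [PySem.List.count] using this
      · simp [List.count_eq_zero_of_not_mem hcm]
    exact absurd ((check_iff _ _).mpr hc) (by simp [hb])
  · have hc := (check_iff word.toList cards).mp hb
    apply List.all_eq_true.mpr
    intro c _
    simpa [PySem.List.count] using hc c

theorem A_cons (cards : List String) (w : String × Int) (ws : List (String × Int))
    (mv : Option Int) (mw : String) :
    create_words_recursive cards (w :: ws) mv mw
      = (let wv := (w :: ws).getLast (by simp)
         let acc : Option Int × String :=
           if check_if_word_in_cards cards wv.1.toList then
             if (match mv with | none => true | some v => v < wv.2) then (some wv.2, wv.1)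
             else (mv, mw)
           else (mv, mw)
         create_words_recursive cards (w :: ws).dropLast acc.1 acc.2) := by
  rw [create_words_recursive.eq_def]

theorem A_snoc (cards : List String) (ws : List (String × Int)) (x : String × Int)
    (mv : Option Int) (mw : String) :
    create_words_recursive cards (ws ++ [x]) mv mw
      = (let acc : Option Int × String :=
           if check_if_word_in_cards cards x.1.toList then
             if (match mv with | none => true | some v => v < x.2) then (some x.2, x.1)
             else (mv, mw)
           else (mv, mw)
         create_words_recursive cards ws acc.1 acc.2) := by
  cases ws with
  | nil =>
    rw [show ([] : List (String × Int)) ++ [x] = x :: [] from rfl, A_cons]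
    rfl
  | cons w t =>
    rw [show (w :: t) ++ [x] = w :: (t ++ [x]) from rfl, A_cons]
    simp only [← List.cons_append, List.getLast_append_singleton, List.dropLast_concat]

theorem alt_snoc (cards : List String) (ws : List (String × Int)) (x : String × Int)
    (mv : Option Int) (mw : String) :
    create_words_recursive_alt cards (ws ++ [x]) mv mw
      = (let acc : Option Int × String :=
           if pyBuildable cards x.1 then
             if (match mv with | none => true | some v => v < x.2) then (some x.2, x.1)
             else (mv, mw)
           else (mv, mw)
         create_words_recursive_alt cards ws acc.1 acc.2) := by
  unfold create_words_recursive_alt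
  rw [List.reverse_append]
  simp only [List.reverse_cons, List.reverse_nil, List.nil_append, List.cons_append,
    List.foldl_cons]

theorem main_eq (cards : List String) (words : List (String × Int)) :
    ∀ (mv : Option Int) (mw : String),
      create_words_recursive cards words mv mw = create_words_recursive_alt cards words mv mw := by
  induction words using List.reverseRecOn with
  | nil => intro mv mw; simp [create_words_recursive, create_words_recursive_alt]
  | append_singleton ws x ih =>
    intro mv mw
    rw [A_snoc, alt_snoc, buildable_eq_check]
    exact ih _ _

-- ===== VERDICT (by name: the statement is the Claim_ definition above) =====
theorem create_words_recursive_spec : Claim_equal_create_words_recursive := by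
  intro cards words mv mw _
  unfold Spec_create_words_recursive
  exact main_eq cards words mv mw
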